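-- pv_equiv track=rewrite | github.com/Vizuara-AI-Lab/Visual-ML | server/app/ml/genai_engine.py | _filter_execution_order
-- ===== SOURCE A (Python) =====
-- from typing import Dict, Any, List, Optional, Set
--
-- def _filter_execution_order(
--     execution_order: List[int], start_node_id: int, dag: Dict[int, List[int]]
-- ) -> List[int]:
--     """Filter execution order for partial runs."""
--     # Find all downstream nodes from start_node_id
--     downstream: Set[int] = set()
--
--     def traverse(node_id: int):
--         downstream.add(node_id)
--         for child in dag.get(node_id, []):
--             if child not in downstream:
--                 traverse(child)
--
--     traverse(start_node_id)
--
--     # Keep only downstream nodes in original order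
--     return [nid for nid in execution_order if nid in downstream]
-- ===== SOURCE B (Python) =====
-- from typing import Dict, List
--
--
-- def _filter_execution_order(
--     execution_order: List[int], start_node_id: int, dag: Dict[int, List[int]]
-- ) -> List[int]:
--     """Filter execution order for partial runs (iterative worklist traversal)."""
--     downstream = set()
--     queue = [start_node_id]
--     while queue:
--         node = queue.pop(0)
--         if node in downstream:
--             continue
--         downstream.add(node)
--         for child in dag.get(node, []):
--             if child not in downstream:
--                 queue.append(child)
--     return [nid for nid in execution_order if nid in downstream]
-- ===== Notes on version B (the rewrite author's own statement) =====
-- stated objective: idiomatic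
-- what changed: The recursive closure-mutating DFS helper is replaced by an explicit iterative worklist (queue + visited set), avoiding Python recursion; only set membership is used afterwards, so traversal order is irrelevant and the order-preserving filter is unchanged.
import Mathlib
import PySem

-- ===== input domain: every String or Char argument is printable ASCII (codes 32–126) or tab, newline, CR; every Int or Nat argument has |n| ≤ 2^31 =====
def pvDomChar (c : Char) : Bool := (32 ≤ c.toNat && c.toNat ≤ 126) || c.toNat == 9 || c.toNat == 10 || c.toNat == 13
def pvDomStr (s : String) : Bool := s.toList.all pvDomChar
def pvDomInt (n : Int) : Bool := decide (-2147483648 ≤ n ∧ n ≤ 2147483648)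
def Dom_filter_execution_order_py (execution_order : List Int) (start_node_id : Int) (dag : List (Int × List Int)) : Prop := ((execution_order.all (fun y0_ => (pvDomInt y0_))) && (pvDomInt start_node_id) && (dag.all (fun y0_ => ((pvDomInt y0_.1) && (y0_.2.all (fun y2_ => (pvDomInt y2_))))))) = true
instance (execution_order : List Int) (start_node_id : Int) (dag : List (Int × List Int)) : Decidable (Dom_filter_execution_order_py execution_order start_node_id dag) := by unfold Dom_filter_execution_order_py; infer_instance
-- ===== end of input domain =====

-- B replaces A's recursive closure-mutating DFS helper by an explicit iterative worklist
-- (queue + visited set); only set membership is used afterwards, so the filtered result is equal.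

-- ===== PORT A =====
-- dag.get(n, []) on the association list (first match, Python dict lookup)
def pvChildren (dag : List (Int × List Int)) (n : Int) : List Int :=
  (((dag.find? (fun kv => kv.1 == n)).map (fun kv => kv.2)).getD [])

-- node universe: the start node and every child occurring in dag (fuel bounds only; not in Python)
def pvUniv (start : Int) (dag : List (Int × List Int)) : List Int :=
  start :: dag.flatMap (fun kv => kv.2)

-- 'def traverse(node_id): downstream.add(node_id); for child in dag.get(node_id, []): if child not in downstream: traverse(child)'
-- The Nat argument is fuel, a totality guard only: 1 + |pvUniv| always suffices (proved below).
mutual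
def pvTravA (dag : List (Int × List Int)) : Nat → Int → PySem.Set Int → PySem.Set Int
  | 0, _, S => S
  | f+1, n, S => pvLoopA dag f (pvChildren dag n) (PySem.Set.add S n)
termination_by f _ _ => (f, 0)

def pvLoopA (dag : List (Int × List Int)) : Nat → List Int → PySem.Set Int → PySem.Set Int
  | _, [], S => S
  | f, c :: cs, S => pvLoopA dag f cs (if c ∈ S then S else pvTravA dag f c S)
termination_by f cs _ => (f, cs.length + 1)
end

def filter_execution_order_py (execution_order : List Int) (start_node_id : Int) (dag : List (Int × List Int)) : List Int :=
  let downstream := pvTravA dag (1 + (pvUniv start_node_id dag).length) start_node_id PySem.Set.empty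
  execution_order.filter (fun nid => decide (nid ∈ downstream))

-- ===== PORT B =====
-- 'while queue: node = queue.pop(0); if node in downstream: continue; downstream.add(node);
--  for child in dag.get(node, []): if child not in downstream: queue.append(child)'
-- The Nat argument is fuel, a totality guard only: pvFuelB always suffices (proved below).
def pvLoopB (dag : List (Int × List Int)) : Nat → List Int → PySem.Set Int → PySem.Set Int
  | 0, _, S => S
  | _+1, [], S => S
  | f+1, node :: rest, S =>
    if node ∈ S then pvLoopB dag f rest S
    else
      pvLoopB dag f
        (rest ++ (pvChildren dag node).filter (fun c => !decide (c ∈ PySem.Set.add S node)))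
        (PySem.Set.add S node)

def pvFuelB (start : Int) (dag : List (Int × List Int)) : Nat :=
  2 + ((pvUniv start dag).map (fun n => 1 + (pvChildren dag n).length)).sum

def filter_execution_order_py_alt (execution_order : List Int) (start_node_id : Int) (dag : List (Int × List Int)) : List Int :=
  let downstream := pvLoopB dag (pvFuelB start_node_id dag) [start_node_id] PySem.Set.empty
  execution_order.filter (fun nid => decide (nid ∈ downstream))

-- ===== PRECONDITION & SPEC =====
def Spec_filter_execution_order_py (execution_order : List Int) (start_node_id : Int) (dag : List (Int × List Int)) (out : List Int) : Prop := out = filter_execution_order_py_alt execution_order start_node_id dag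
instance (execution_order : List Int) (start_node_id : Int) (dag : List (Int × List Int)) (out : List Int) : Decidable (Spec_filter_execution_order_py execution_order start_node_id dag out) := by unfold Spec_filter_execution_order_py; infer_instance

-- ===== CLAIM (what is proved, stated in full; the proofs are below) =====
def Claim_equal_filter_execution_order_py : Prop := ∀ (execution_order : List Int) (start_node_id : Int) (dag : List (Int × List Int)), Dom_filter_execution_order_py execution_order start_node_id dag → Spec_filter_execution_order_py execution_order start_node_id dag (filter_execution_order_py execution_order start_node_id dag)

-- ===== LEMMAS AND PROOFS =====

-- reachability in dag (reflexive-transitive closure of the child relation)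
inductive pvReach (dag : List (Int × List Int)) : Int → Int → Prop
  | refl (n : Int) : pvReach dag n n
  | tail {n a b : Int} : pvReach dag n a → b ∈ pvChildren dag a → pvReach dag n b

theorem pvReach_head (dag : List (Int × List Int)) {a b x : Int}
    (h1 : b ∈ pvChildren dag a) (h2 : pvReach dag b x) : pvReach dag a x := by
  induction h2 with
  | refl => exact .tail (.refl a) h1
  | tail _ hc ih => exact .tail ih hc

theorem pvChildren_sub_univ (start : Int) (dag : List (Int × List Int)) :
    ∀ n : Int, ∀ c ∈ pvChildren dag n, c ∈ pvUniv start dag := by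
  intro n c hc
  unfold pvChildren at hc
  unfold pvUniv
  cases hfind : dag.find? (fun kv => kv.1 == n) with
  | none => simp [hfind] at hc
  | some kv =>
    simp only [hfind, Option.map_some, Option.getD_some] at hc
    have hmem := List.mem_of_find?_eq_some hfind
    exact List.mem_cons_of_mem _ (List.mem_flatMap.mpr ⟨kv, hmem, hc⟩)

-- weighted count of not-yet-visited universe nodes (fuel measure)
def pvSumW (w : Int → Nat) (univ S : List Int) : Nat :=
  ((univ.filter (fun n => !decide (n ∈ S))).map w).sum

theorem pvSumW_cons (w : Int → Nat) (a : Int) (l S : List Int) :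
    pvSumW w (a :: l) S = (if a ∈ S then 0 else w a) + pvSumW w l S := by
  simp only [pvSumW, List.filter_cons]
  by_cases h : a ∈ S <;> simp [h]

theorem pvSumW_mono (w : Int → Nat) (univ : List Int) {S S' : List Int}
    (h : ∀ x ∈ S, x ∈ S') : pvSumW w univ S' ≤ pvSumW w univ S := by
  induction univ with
  | nil => simp [pvSumW]
  | cons a l ih =>
    rw [pvSumW_cons, pvSumW_cons]
    by_cases ha : a ∈ S'
    · by_cases ha2 : a ∈ S <;> simp [ha, ha2] <;> omega
    · have ha2 : a ∉ S := fun hx => ha (h a hx)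
      simp [ha, ha2]; omega

theorem pvSumW_add (w : Int → Nat) (univ : List Int) {S : List Int} {n : Int}
    (hn : n ∈ univ) (hS : n ∉ S) :
    pvSumW w univ (PySem.Set.add S n) + w n ≤ pvSumW w univ S := by
  induction univ with
  | nil => simp at hn
  | cons a l ih =>
    rw [pvSumW_cons, pvSumW_cons]
    by_cases han : a = n
    · subst han
      have h1 : a ∈ PySem.Set.add S a := (PySem.Set.mem_add _ _ _).mpr (Or.inr rfl)
      have hmono : pvSumW w l (PySem.Set.add S a) ≤ pvSumW w l S :=
        pvSumW_mono w l (fun x hx => (PySem.Set.mem_add _ _ _).mpr (Or.inl hx))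
      simp only [h1, if_true, hS, if_false]
      omega
    · have hn' : n ∈ l := by
        rcases List.mem_cons.mp hn with h | h
        · exact absurd h.symm han
        · exact h
      have hiff : a ∈ PySem.Set.add S n ↔ a ∈ S := by
        rw [PySem.Set.mem_add _ _ _]
        exact ⟨fun h => h.elim id (fun h => absurd h han), Or.inl⟩
      by_cases haS : a ∈ S
      · simp only [hiff.mpr haS, if_true, haS]
        have := ih hn'; omega
      · have := ih hn'
        simp only [if_neg (fun h => haS (hiff.mp h)), if_neg haS]
        omega

-- the inductive property of A's recursive DFS (fuel-indexed)
def pvTravP (dag : List (Int × List Int)) (univ : List Int) (f : Nat) : Prop :=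
  ∀ (n : Int) (S : List Int), n ∈ univ → n ∉ S →
    1 + pvSumW (fun _ => 1) univ S ≤ f →
    (∀ x ∈ S, x ∈ pvTravA dag f n S) ∧
    n ∈ pvTravA dag f n S ∧
    (∀ x ∈ pvTravA dag f n S, x ∈ S ∨ pvReach dag n x) ∧
    (∀ a ∈ pvTravA dag f n S, a ∉ S → ∀ c ∈ pvChildren dag a, c ∈ pvTravA dag f n S)

theorem pvLoopA_spec (dag : List (Int × List Int)) (univ : List Int) (f : Nat)
    (htrav : pvTravP dag univ f) :
    ∀ (cs : List Int) (S : List Int), (∀ c ∈ cs, c ∈ univ) →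
      1 + pvSumW (fun _ => 1) univ S ≤ f →
      (∀ x ∈ S, x ∈ pvLoopA dag f cs S) ∧
      (∀ c ∈ cs, c ∈ pvLoopA dag f cs S) ∧
      (∀ x ∈ pvLoopA dag f cs S, x ∈ S ∨ ∃ c ∈ cs, pvReach dag c x) ∧
      (∀ a ∈ pvLoopA dag f cs S, a ∉ S → ∀ c ∈ pvChildren dag a, c ∈ pvLoopA dag f cs S) := by
  intro cs
  induction cs with
  | nil =>
    intro S _ _
    have hrw : pvLoopA dag f [] S = S := by simp [pvLoopA]
    rw [hrw]
    refine ⟨fun x hx => hx, by simp, fun x hx => Or.inl hx, fun a ha hna => absurd ha hna⟩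
  | cons c cs ih =>
    intro S hcs hfuel
    by_cases hc : c ∈ S
    · have hrw : pvLoopA dag f (c :: cs) S = pvLoopA dag f cs S := by
        simp [pvLoopA, hc]
      obtain ⟨h1, h2, h3, h4⟩ := ih S (fun x hx => hcs x (List.mem_cons_of_mem _ hx)) hfuel
      rw [hrw]
      refine ⟨h1, ?_, ?_, h4⟩
      · intro c' hc'
        rcases List.mem_cons.mp hc' with h | h
        · exact h ▸ h1 c hc
        · exact h2 c' h
      · intro x hx
        rcases h3 x hx with h | ⟨c', hmem, hr⟩
        · exact Or.inl h
        · exact Or.inr ⟨c', List.mem_cons_of_mem _ hmem, hr⟩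
    · have hrw : pvLoopA dag f (c :: cs) S = pvLoopA dag f cs (pvTravA dag f c S) := by
        simp [pvLoopA, hc]
      obtain ⟨t1, t2, t3, t4⟩ := htrav c S (hcs c List.mem_cons_self) hc hfuel
      have haddsub : ∀ x ∈ PySem.Set.add S c, x ∈ pvTravA dag f c S := by
        intro x hx
        rcases (PySem.Set.mem_add _ _ _).mp hx with h | h
        · exact t1 x h
        · exact h ▸ t2
      have hfuel2 : 1 + pvSumW (fun _ => 1) univ (pvTravA dag f c S) ≤ f := by
        have h1 : pvSumW (fun _ => 1) univ (pvTravA dag f c S)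
            ≤ pvSumW (fun _ => 1) univ (PySem.Set.add S c) :=
          pvSumW_mono _ _ haddsub
        have h2 := pvSumW_add (fun _ => 1) univ (hcs c List.mem_cons_self) hc
        omega
      obtain ⟨l1, l2, l3, l4⟩ := ih (pvTravA dag f c S)
        (fun x hx => hcs x (List.mem_cons_of_mem _ hx)) hfuel2
      rw [hrw]
      refine ⟨fun x hx => l1 x (t1 x hx), ?_, ?_, ?_⟩
      · intro c' hc'
        rcases List.mem_cons.mp hc' with h | h
        · exact h ▸ l1 c t2
        · exact l2 c' h
      · intro x hx
        rcases l3 x hx with h | ⟨c', hmem, hr⟩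
        · rcases t3 x h with h' | h'
          · exact Or.inl h'
          · exact Or.inr ⟨c, List.mem_cons_self, h'⟩
        · exact Or.inr ⟨c', List.mem_cons_of_mem _ hmem, hr⟩
      · intro a ha hna c' hc'
        by_cases haT : a ∈ pvTravA dag f c S
        · exact l1 c' (t4 a haT hna c' hc')
        · exact l4 a ha haT c' hc'

theorem pvTravA_spec (dag : List (Int × List Int)) (univ : List Int)
    (hcl : ∀ n : Int, ∀ c ∈ pvChildren dag n, c ∈ univ) :
    ∀ f : Nat, pvTravP dag univ f := by
  intro f
  induction f with
  | zero => intro n S _ _ hfuel; omega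
  | succ f ih =>
    intro n S hn hnS hfuel
    have hrw : pvTravA dag (f+1) n S = pvLoopA dag f (pvChildren dag n) (PySem.Set.add S n) := by
      simp [pvTravA]
    have hfuel2 : 1 + pvSumW (fun _ => 1) univ (PySem.Set.add S n) ≤ f := by
      have h2 : pvSumW (fun _ => 1) univ (PySem.Set.add S n) + 1
          ≤ pvSumW (fun _ => 1) univ S := pvSumW_add (fun _ => 1) univ hn hnS
      omega
    obtain ⟨l1, l2, l3, l4⟩ := pvLoopA_spec dag univ f ih (pvChildren dag n)
      (PySem.Set.add S n) (hcl n) hfuel2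
    rw [hrw]
    have hmemn : n ∈ pvLoopA dag f (pvChildren dag n) (PySem.Set.add S n) :=
      l1 n ((PySem.Set.mem_add _ _ _).mpr (Or.inr rfl))
    refine ⟨fun x hx => l1 x ((PySem.Set.mem_add _ _ _).mpr (Or.inl hx)), hmemn, ?_, ?_⟩
    · intro x hx
      rcases l3 x hx with h | ⟨c, hmem, hr⟩
      · rcases (PySem.Set.mem_add _ _ _).mp h with h' | h'
        · exact Or.inl h'
        · exact Or.inr (by rw [h']; exact pvReach.refl n)
      · exact Or.inr (pvReach_head dag hmem hr)
    · intro a ha hna c hc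
      by_cases han : a = n
      · exact l2 c (han ▸ hc)
      · have : a ∉ PySem.Set.add S n := by
          intro hx; rcases (PySem.Set.mem_add _ _ _).mp hx with h | h
          · exact hna h
          · exact han h
        exact l4 a ha this c hc

-- the inductive property of B's worklist loop (fuel-indexed)
theorem pvLoopB_spec (dag : List (Int × List Int)) (univ : List Int)
    (hcl : ∀ n : Int, ∀ c ∈ pvChildren dag n, c ∈ univ) :
    ∀ (f : Nat) (stack S : List Int), (∀ s ∈ stack, s ∈ univ) →
      1 + stack.length + pvSumW (fun n => 1 + (pvChildren dag n).length) univ S ≤ f →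
      (∀ x ∈ S, x ∈ pvLoopB dag f stack S) ∧
      (∀ s ∈ stack, s ∈ pvLoopB dag f stack S) ∧
      (∀ x ∈ pvLoopB dag f stack S, x ∈ S ∨ ∃ s ∈ stack, pvReach dag s x) ∧
      ((∀ a ∈ S, ∀ c ∈ pvChildren dag a, c ∈ S ∨ c ∈ stack) →
        ∀ a ∈ pvLoopB dag f stack S, ∀ c ∈ pvChildren dag a, c ∈ pvLoopB dag f stack S) := by
  intro f
  induction f with
  | zero => intro stack S _ hfuel; omega
  | succ f ih =>
    intro stack S hstack hfuel
    cases stack with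
    | nil =>
      refine ⟨fun x hx => hx, by simp, fun x hx => Or.inl hx, ?_⟩
      intro hinv a ha c hc
      rcases hinv a ha c hc with h | h
      · exact h
      · simp at h
    | cons node rest =>
      by_cases hnode : node ∈ S
      · have hrw : pvLoopB dag (f+1) (node :: rest) S = pvLoopB dag f rest S := by
          simp [pvLoopB, hnode]
        have hfuel2 : 1 + rest.length
            + pvSumW (fun n => 1 + (pvChildren dag n).length) univ S ≤ f := by
          simp only [List.length_cons] at hfuel; omega
        obtain ⟨l1, l2, l3, l4⟩ := ih rest S
          (fun s hs => hstack s (List.mem_cons_of_mem _ hs)) hfuel2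
        rw [hrw]
        refine ⟨l1, ?_, ?_, ?_⟩
        · intro s hs
          rcases List.mem_cons.mp hs with h | h
          · exact h ▸ l1 node hnode
          · exact l2 s h
        · intro x hx
          rcases l3 x hx with h | ⟨s, hmem, hr⟩
          · exact Or.inl h
          · exact Or.inr ⟨s, List.mem_cons_of_mem _ hmem, hr⟩
        · intro hinv
          apply l4
          intro a ha c hc
          rcases hinv a ha c hc with h | h
          · exact Or.inl h
          · rcases List.mem_cons.mp h with h' | h'
            · exact Or.inl (h' ▸ hnode)
            · exact Or.inr h'
      · have hnodeu : node ∈ univ := hstack node List.mem_cons_self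
        set S' := PySem.Set.add S node with hS'
        set newstack := rest ++ (pvChildren dag node).filter
          (fun c => !decide (c ∈ PySem.Set.add S node)) with hnewstack
        have hrw : pvLoopB dag (f+1) (node :: rest) S = pvLoopB dag f newstack S' := by
          simp [pvLoopB, hnode, hS', hnewstack]
        have hstack2 : ∀ s ∈ newstack, s ∈ univ := by
          intro s hs
          rcases List.mem_append.mp hs with h | h
          · exact hstack s (List.mem_cons_of_mem _ h)
          · exact hcl node s (List.mem_filter.mp h).1
        have hfuel2 : 1 + newstack.length
            + pvSumW (fun n => 1 + (pvChildren dag n).length) univ S' ≤ f := by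
          have hlen : newstack.length ≤ rest.length + (pvChildren dag node).length := by
            rw [hnewstack, List.length_append]
            have := List.length_filter_le
              (fun c => !decide (c ∈ PySem.Set.add S node)) (pvChildren dag node)
            omega
          have hsum : pvSumW (fun n => 1 + (pvChildren dag n).length) univ S'
              + (1 + (pvChildren dag node).length)
              ≤ pvSumW (fun n => 1 + (pvChildren dag n).length) univ S := by
            rw [hS']
            exact pvSumW_add _ _ hnodeu hnode
          simp only [List.length_cons] at hfuel
          omega
        obtain ⟨l1, l2, l3, l4⟩ := ih newstack S' hstack2 hfuel2
        rw [hrw]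
        have hsub : ∀ x ∈ S, x ∈ S' := fun x hx => (PySem.Set.mem_add _ _ _).mpr (Or.inl hx)
        have hnodeS' : node ∈ S' := (PySem.Set.mem_add _ _ _).mpr (Or.inr rfl)
        refine ⟨fun x hx => l1 x (hsub x hx), ?_, ?_, ?_⟩
        · intro s hs
          rcases List.mem_cons.mp hs with h | h
          · exact h ▸ l1 node hnodeS'
          · exact l2 s (List.mem_append.mpr (Or.inl h))
        · intro x hx
          rcases l3 x hx with h | ⟨s, hmem, hr⟩
          · rcases (PySem.Set.mem_add _ _ _).mp h with h' | h'
            · exact Or.inl h'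
            · exact Or.inr ⟨node, List.mem_cons_self, by rw [h']; exact pvReach.refl node⟩
          · rcases List.mem_append.mp hmem with h' | h'
            · exact Or.inr ⟨s, List.mem_cons_of_mem _ h', hr⟩
            · exact Or.inr ⟨node, List.mem_cons_self,
                pvReach_head dag (List.mem_filter.mp h').1 hr⟩
        · intro hinv
          apply l4
          intro a ha c hc
          rcases (PySem.Set.mem_add _ _ _).mp ha with haS | haN
          · rcases hinv a haS c hc with h | h
            · exact Or.inl (hsub c h)
            · rcases List.mem_cons.mp h with h' | h'
              · exact Or.inl (h' ▸ hnodeS')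
              · exact Or.inr (List.mem_append.mpr (Or.inl h'))
          · subst haN
            by_cases hcS' : c ∈ S'
            · exact Or.inl hcS'
            · refine Or.inr (List.mem_append.mpr (Or.inr ?_))
              refine List.mem_filter.mpr ⟨hc, ?_⟩
              rw [← hS']
              simpa using hcS'

theorem pvSumW_empty (w : Int → Nat) (univ : List Int) :
    pvSumW w univ [] = (univ.map w).sum := by
  simp [pvSumW]

-- A's downstream set is exactly the set of nodes reachable from start
theorem memA_iff (start : Int) (dag : List (Int × List Int)) (x : Int) :
    x ∈ pvTravA dag (1 + (pvUniv start dag).length) start PySem.Set.empty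
      ↔ pvReach dag start x := by
  have hfuel : 1 + pvSumW (fun _ => 1) (pvUniv start dag) ([] : List Int)
      ≤ 1 + (pvUniv start dag).length := by
    rw [pvSumW_empty]
    simp
  obtain ⟨h1, h2, h3, h4⟩ := pvTravA_spec dag (pvUniv start dag)
    (pvChildren_sub_univ start dag) (1 + (pvUniv start dag).length) start []
    (List.mem_cons_self) (by simp) hfuel
  constructor
  · intro hx
    rcases h3 x hx with h | h
    · simp at h
    · exact h
  · intro hr
    induction hr with
    | refl => exact h2
    | tail _ hc ihm => exact h4 _ ihm (by simp) _ hc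

-- B's downstream set is exactly the set of nodes reachable from start
theorem memB_iff (start : Int) (dag : List (Int × List Int)) (x : Int) :
    x ∈ pvLoopB dag (pvFuelB start dag) [start] PySem.Set.empty
      ↔ pvReach dag start x := by
  have hfuel : 1 + ([start] : List Int).length
      + pvSumW (fun n => 1 + (pvChildren dag n).length) (pvUniv start dag) ([] : List Int)
      ≤ pvFuelB start dag := by
    rw [pvSumW_empty]
    simp [pvFuelB]
  obtain ⟨h1, h2, h3, h4⟩ := pvLoopB_spec dag (pvUniv start dag)
    (pvChildren_sub_univ start dag) (pvFuelB start dag) [start] []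
    (by intro s hs; simp at hs; subst hs; exact List.mem_cons_self) hfuel
  have hclosed := h4 (by simp)
  constructor
  · intro hx
    rcases h3 x hx with h | ⟨s, hs, hr⟩
    · simp at h
    · simp at hs; exact hs ▸ hr
  · intro hr
    induction hr with
    | refl => exact h2 start List.mem_cons_self
    | tail _ hc ihm => exact hclosed _ ihm _ hc

-- ===== VERDICT (by name: the statement is the Claim_ definition above) =====
theorem filter_execution_order_py_spec : Claim_equal_filter_execution_order_py := by
  intro execution_order start_node_id dag _
  unfold Spec_filter_execution_order_py filter_execution_order_py filter_execution_order_py_alt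
  apply List.filter_congr
  intro x _
  simp only [decide_eq_decide]
  rw [memA_iff, memB_iff]
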